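-- pv_equiv track=rewrite | github.com/kurt-stolle/unipercept | sources/unipercept/nn/layers/deform_attn/_mod.py | _lookup_backward_stride_thread
-- ===== SOURCE A (Python) =====
-- def _get_factors(N):
--     res = []
--     for i in range(1, N + 1):
--         if N % i == 0:
--             res.append(i)
--     return res
--
-- def _lookup_backward_stride_thread(B, Q, G, C):
--     if C >= 64:
--         d_stride = 2
--     else:
--         d_stride = 1
--
--     ms = _get_factors(B * Q)
--     multiplier = 1
--     for m in ms:
--         if m <= 64 and (m * G * C // d_stride) <= 256:
--             multiplier = m
--     n_thread = multiplier * G * C // d_stride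
--     return d_stride, n_thread
-- ===== SOURCE B (Python) =====
-- def _lookup_backward_stride_thread(B, Q, G, C):
--     d_stride = 2 if C >= 64 else 1
--     N = B * Q
--     multiplier = 1
--     if N > 0:
--         for m in range(min(64, N), 0, -1):
--             if N % m == 0 and (m * G * C) // d_stride <= 256:
--                 multiplier = m
--                 break
--     n_thread = multiplier * G * C // d_stride
--     return d_stride, n_thread
-- ===== Notes on version B (the rewrite author's own statement) =====
-- stated objective: faster
-- what changed: Instead of enumerating all factors of B*Q by trial division up to B*Q and keeping the last admissible one, B scans m downward from min(64, B*Q) and returns at the first m that divides B*Q and satisfies the thread bound.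
import Mathlib
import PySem

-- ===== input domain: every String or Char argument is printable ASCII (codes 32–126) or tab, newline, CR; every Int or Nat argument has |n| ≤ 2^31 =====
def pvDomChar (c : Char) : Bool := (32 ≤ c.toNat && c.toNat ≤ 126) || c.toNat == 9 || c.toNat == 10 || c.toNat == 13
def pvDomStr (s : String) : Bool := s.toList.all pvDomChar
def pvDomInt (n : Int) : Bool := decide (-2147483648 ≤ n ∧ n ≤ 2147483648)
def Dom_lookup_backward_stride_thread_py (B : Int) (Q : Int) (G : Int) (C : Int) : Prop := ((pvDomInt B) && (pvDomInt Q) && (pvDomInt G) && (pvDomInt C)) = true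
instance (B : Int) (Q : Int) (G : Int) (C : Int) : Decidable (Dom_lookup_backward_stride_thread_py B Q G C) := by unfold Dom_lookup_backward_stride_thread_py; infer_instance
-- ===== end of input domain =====

-- B replaces A's O(B*Q) enumeration of all factors of B*Q by a downward scan of m = min(64, B*Q)..1
-- taking the first admissible divisor (objective: faster, asymptotic O(B*Q) -> O(1)).

-- ===== PORT A =====
-- _get_factors(N): collect every i in 1..N with N % i == 0
def pvGetFactors (N : Int) : List Int :=
  (PySem.List.pyRange 1 (N + 1) 1).foldl
    (fun res i => if PySem.Int.mod N i == 0 then res ++ [i] else res) []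

def lookup_backward_stride_thread_py (B : Int) (Q : Int) (G : Int) (C : Int) : Int × Int :=
  let d_stride : Int := if C ≥ 64 then 2 else 1
  let ms := pvGetFactors (B * Q)
  let multiplier := ms.foldl
    (fun mult m => if m ≤ 64 ∧ PySem.Int.floordiv (m * G * C) d_stride ≤ 256 then m else mult) 1
  (d_stride, PySem.Int.floordiv (multiplier * G * C) d_stride)

-- ===== PORT B =====
-- the 'for m in range(k, 0, -1): if …: multiplier = m; break' loop of Source B,
-- as structural recursion on the Nat counter k = current m
def pvScanDown (N : Int) (G : Int) (C : Int) (d : Int) : Nat → Int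
  | 0 => 1
  | k + 1 =>
    let m : Int := (k : Int) + 1
    if PySem.Int.mod N m == 0 ∧ PySem.Int.floordiv (m * G * C) d ≤ 256 then m
    else pvScanDown N G C d k

def lookup_backward_stride_thread_py_alt (B : Int) (Q : Int) (G : Int) (C : Int) : Int × Int :=
  let d_stride : Int := if C ≥ 64 then 2 else 1
  let N := B * Q
  let multiplier := if N > 0 then pvScanDown N G C d_stride (min 64 N).toNat else 1
  (d_stride, PySem.Int.floordiv (multiplier * G * C) d_stride)

-- ===== PRECONDITION & SPEC =====
def Spec_lookup_backward_stride_thread_py (B : Int) (Q : Int) (G : Int) (C : Int) (out : Int × Int) : Prop := out = lookup_backward_stride_thread_py_alt B Q G C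
instance (B : Int) (Q : Int) (G : Int) (C : Int) (out : Int × Int) : Decidable (Spec_lookup_backward_stride_thread_py B Q G C out) := by unfold Spec_lookup_backward_stride_thread_py; infer_instance

-- ===== CLAIM (what is proved, stated in full; the proofs are below) =====
def Claim_equal_lookup_backward_stride_thread_py : Prop := ∀ (B : Int) (Q : Int) (G : Int) (C : Int), Dom_lookup_backward_stride_thread_py B Q G C → Spec_lookup_backward_stride_thread_py B Q G C (lookup_backward_stride_thread_py B Q G C)

-- ===== LEMMAS AND PROOFS =====

-- abbreviation for A's fold step (after fusing the factor filter into the fold)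
def pvStep (N G C d : Int) (mult m : Int) : Int :=
  if PySem.Int.mod N m == 0 then
    (if m ≤ 64 ∧ PySem.Int.floordiv (m * G * C) d ≤ 256 then m else mult)
  else mult

lemma pvFactors_eq_filter (N : Int) :
    pvGetFactors N = (PySem.List.pyRange 1 (N + 1) 1).filter (fun i => PySem.Int.mod N i == 0) := by
  unfold pvGetFactors
  simpa using PySem.List.foldl_append_if (fun i => PySem.Int.mod N i == 0) (id : Int → Int)
    (PySem.List.pyRange 1 (N + 1) 1) []

lemma pvMult_eq_foldl_step (N G C d : Int) :
    (pvGetFactors N).foldl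
      (fun mult m => if m ≤ 64 ∧ PySem.Int.floordiv (m * G * C) d ≤ 256 then m else mult) 1
    = (PySem.List.pyRange 1 (N + 1) 1).foldl (pvStep N G C d) 1 := by
  rw [pvFactors_eq_filter, List.foldl_filter]
  rfl

-- core: the ascending last-match fold over 1..k equals the descending first-match scan, for k ≤ 64
lemma pvFold_eq_scan (N G C d : Int) (k : Nat) (hk : (k : Int) ≤ 64) :
    (PySem.List.pyRange 1 ((k : Int) + 1) 1).foldl (pvStep N G C d) 1 = pvScanDown N G C d k := by
  induction k with
  | zero => simp [PySem.List.pyRange_one_eq_nil, pvScanDown]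
  | succ k ih =>
    have h1 : (1 : Int) ≤ (k : Int) + 1 := by omega
    have : ((k + 1 : Nat) : Int) + 1 = ((k : Int) + 1) + 1 := by push_cast; ring
    rw [this, PySem.List.pyRange_one_succ_right h1, List.foldl_append]
    have hk' : (k : Int) ≤ 64 := by push_cast at hk ⊢; omega
    rw [ih hk']
    show pvStep N G C d (pvScanDown N G C d k) ((k : Int) + 1) = pvScanDown N G C d (k + 1)
    have hle : ((k : Int) + 1) ≤ 64 := by exact_mod_cast hk
    have hunf : pvScanDown N G C d (k + 1)
        = if PySem.Int.mod N ((k : Int) + 1) == 0 ∧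
              PySem.Int.floordiv (((k : Int) + 1) * G * C) d ≤ 256 then ((k : Int) + 1)
          else pvScanDown N G C d k := rfl
    rw [hunf]
    by_cases h1 : ((k : Int) + 1) ∣ N <;>
      by_cases h2 : PySem.Int.floordiv (((k : Int) + 1) * G * C) d ≤ 256 <;>
      simp [pvStep, beq_iff_eq, h1, h2, hle]

-- the fold ignores every m > 64
lemma pvFold_const_of_big (N G C d : Int) (l : List Int) (acc : Int)
    (h : ∀ m ∈ l, (64 : Int) < m) : l.foldl (pvStep N G C d) acc = acc := by
  induction l generalizing acc with
  | nil => rfl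
  | cons x xs ih =>
    have hx : (64 : Int) < x := h x (List.mem_cons_self)
    have : pvStep N G C d acc x = acc := by
      unfold pvStep
      have : ¬ (x ≤ 64 ∧ PySem.Int.floordiv (x * G * C) d ≤ 256) := by
        rintro ⟨h1, _⟩; omega
      simp [this]
    rw [List.foldl_cons, this]
    exact ih acc (fun m hm => h m (List.mem_cons_of_mem _ hm))

lemma pvMult_agree (N G C d : Int) :
    (PySem.List.pyRange 1 (N + 1) 1).foldl (pvStep N G C d) 1
    = (if N > 0 then pvScanDown N G C d (min 64 N).toNat else 1) := by
  by_cases hpos : N > 0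
  · simp only [hpos, if_true]
    by_cases h64 : N ≤ 64
    · have hmin : (min 64 N).toNat = N.toNat := by omega
      have hcast : ((N.toNat : Int)) = N := by omega
      rw [hmin]
      have := pvFold_eq_scan N G C d N.toNat (by omega)
      rw [hcast] at this
      exact this
    · have hmin : (min 64 N).toNat = 64 := by omega
      rw [hmin]
      rw [PySem.List.pyRange_one_append 1 65 (N + 1) (by omega) (by omega), List.foldl_append]
      have h65 : (PySem.List.pyRange 1 ((64 : Nat) + 1 : Int) 1) = PySem.List.pyRange 1 65 1 := by
        norm_num
      rw [← h65, pvFold_eq_scan N G C d 64 (by norm_num)]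
      exact pvFold_const_of_big N G C d _ _
        (fun m hm => by
          rcases PySem.List.mem_pyRange_one.mp hm with ⟨h1, _⟩; omega)
  · have : N + 1 ≤ 1 := by omega
    rw [PySem.List.pyRange_one_eq_nil this]
    simp [hpos]

-- ===== VERDICT (by name: the statement is the Claim_ definition above) =====
theorem lookup_backward_stride_thread_py_spec : Claim_equal_lookup_backward_stride_thread_py := by
  intro B Q G C _
  unfold Spec_lookup_backward_stride_thread_py
  unfold lookup_backward_stride_thread_py lookup_backward_stride_thread_py_alt
  simp only
  rw [pvMult_eq_foldl_step, pvMult_agree]
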